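-- pv_equiv track=rewrite | github.com/TieuLongPhan/SynTemp | syntemp/SynRule/hierarchical_clustering.py | split_graphs_by_class_and_indices
-- ===== SOURCE A (Python) =====
-- from typing import List, Any, Dict, Tuple
--
-- def split_graphs_by_class_and_indices(
--     graphs: List[Any], class_labels: List[int]
-- ) -> Tuple[Dict[int, List[Any]], Dict[int, List[int]]]:
--     """
--     Splits a list of graphs and their indices into separate lists based on the
--     provided class labels.
--
--     Parameters:
--     - graphs (List[Any]): The list of graphs to be split.
--     - class_labels (List[int]): The list containing class labels corresponding to each
--     graph.
--
--     Returns: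
--     - Tuple[Dict[int, List[Any]], Dict[int, List[int]]]: A tuple containing two
--     dictionaries:
--         1. A dictionary where keys are class labels and values are lists of graphs
--         corresponding to each class.
--         2. A dictionary where keys are class labels and values are lists of indices
--         corresponding to each class.
--     """
--     if len(graphs) != len(class_labels):
--         raise ValueError(
--             "The length of 'graphs' and 'class_labels' must be the same."
--         )
--
--     class_dict = {}
--     index_dict = {}
--     for index, (label, graph) in enumerate(zip(class_labels, graphs)):
--         if label not in class_dict:
--             class_dict[label] = []
--             index_dict[label] = []
--         class_dict[label].append(graph)
--         index_dict[label].append(index)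
--
--     return class_dict, index_dict
-- ===== SOURCE B (Python) =====
-- def split_graphs_by_class_and_indices(graphs, class_labels):
--     if len(graphs) != len(class_labels):
--         raise ValueError(
--             "The length of 'graphs' and 'class_labels' must be the same."
--         )
--     seen = dict.fromkeys(class_labels)  # distinct labels, first-occurrence order
--     class_dict = {
--         lab: [g for g, l in zip(graphs, class_labels) if l == lab] for lab in seen
--     }
--     index_dict = {
--         lab: [i for i, l in enumerate(class_labels) if l == lab] for lab in seen
--     }
--     return class_dict, index_dict
-- ===== Notes on version B (the rewrite author's own statement) =====
-- stated objective: alternative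
-- what changed: The incremental single-pass loop that grows two dicts with membership tests and appends is replaced by first deduplicating the labels and then building each dict in one shot with a per-label comprehension scan over the zipped/enumerated input.
import Mathlib
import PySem

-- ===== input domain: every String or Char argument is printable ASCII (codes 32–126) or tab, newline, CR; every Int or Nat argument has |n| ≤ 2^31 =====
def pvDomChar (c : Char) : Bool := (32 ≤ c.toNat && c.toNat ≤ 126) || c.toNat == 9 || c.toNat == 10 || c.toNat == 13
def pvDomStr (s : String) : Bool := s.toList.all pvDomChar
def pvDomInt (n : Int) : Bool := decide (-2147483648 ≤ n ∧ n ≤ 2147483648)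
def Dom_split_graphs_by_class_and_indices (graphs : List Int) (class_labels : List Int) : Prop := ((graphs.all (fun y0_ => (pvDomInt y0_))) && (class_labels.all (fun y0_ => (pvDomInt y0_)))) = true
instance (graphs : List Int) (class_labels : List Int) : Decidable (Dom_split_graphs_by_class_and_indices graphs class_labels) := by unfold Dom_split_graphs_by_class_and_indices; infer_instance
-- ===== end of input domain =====

-- B replaces A's incremental two-dict loop by deduplicating the labels and building each
-- dict with a per-label scan (alternative decomposition; not claimed faster).


-- ===== PORT A =====
def split_graphs_by_class_and_indices (graphs : List Int) (class_labels : List Int) : (List (Int × List Int)) × (List (Int × List Int)) :=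
  let pairs := PySem.List.enumerate (class_labels.zip graphs) 0
  let s := pairs.foldl (fun s p =>
      let s := if s.1.contains p.2.1 then s
               else (s.1.insert p.2.1 ([] : List Int), s.2.insert p.2.1 ([] : List Int))
      (s.1.modify p.2.1 [] (· ++ [p.2.2]), s.2.modify p.2.1 [] (· ++ [p.1])))
    ((PySem.Dict.empty : PySem.Dict Int (List Int)), (PySem.Dict.empty : PySem.Dict Int (List Int)))
  (s.1.items, s.2.items)

-- ===== PORT B =====
def split_graphs_by_class_and_indices_alt (graphs : List Int) (class_labels : List Int) : (List (Int × List Int)) × (List (Int × List Int)) :=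
  let seen := PySem.List.dedup class_labels
  (seen.map (fun lab => (lab, ((graphs.zip class_labels).filter (fun p => p.2 == lab)).map (·.1))),
   seen.map (fun lab => (lab, ((PySem.List.enumerate class_labels 0).filter (fun p => p.2 == lab)).map (·.1))))

-- ===== PRECONDITION & SPEC =====
-- Pre_ excludes exactly the inputs with len(graphs) ≠ len(class_labels), on which A raises ValueError.
def Pre_split_graphs_by_class_and_indices (graphs : List Int) (class_labels : List Int) : Prop :=
  graphs.length = class_labels.length
instance (graphs : List Int) (class_labels : List Int) : Decidable (Pre_split_graphs_by_class_and_indices graphs class_labels) := by unfold Pre_split_graphs_by_class_and_indices; infer_instance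
def pvWitness_split_graphs_by_class_and_indices : List Int × List Int := ([10, 20, 30], [1, 2, 1])

def Spec_split_graphs_by_class_and_indices (graphs : List Int) (class_labels : List Int) (out : (List (Int × List Int)) × (List (Int × List Int))) : Prop := out = split_graphs_by_class_and_indices_alt graphs class_labels
instance (graphs : List Int) (class_labels : List Int) (out : (List (Int × List Int)) × (List (Int × List Int))) : Decidable (Spec_split_graphs_by_class_and_indices graphs class_labels out) := by unfold Spec_split_graphs_by_class_and_indices; infer_instance

-- ===== CLAIM (what is proved, stated in full; the proofs are below) =====
def Claim_equal_split_graphs_by_class_and_indices : Prop := ∀ (graphs : List Int) (class_labels : List Int), Dom_split_graphs_by_class_and_indices graphs class_labels → Pre_split_graphs_by_class_and_indices graphs class_labels → Spec_split_graphs_by_class_and_indices graphs class_labels (split_graphs_by_class_and_indices graphs class_labels)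

-- ===== LEMMAS AND PROOFS =====

-- A's "if absent insert []; then append" equals a single modify-with-default.
lemma insert_nil_modify (d : PySem.Dict Int (List Int)) (k : Int) (f : List Int → List Int)
    (h : d.contains k = false) : (d.insert k []).modify k [] f = d.modify k [] f := by
  simp [PySem.Dict.modify, PySem.Dict.getD_insert_self, PySem.Dict.insert_insert_self,
    PySem.Dict.getD_of_not_contains _ _ h]

-- The paired fold of A splits into two independent modify-folds.
lemma foldl_pair_split (l : List (Int × Int × Int))
    (cd idd : PySem.Dict Int (List Int))
    (hk : ∀ k, cd.contains k = idd.contains k) :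
    l.foldl (fun s p =>
      let s := if s.1.contains p.2.1 then s
               else (s.1.insert p.2.1 ([] : List Int), s.2.insert p.2.1 ([] : List Int))
      (s.1.modify p.2.1 [] (· ++ [p.2.2]), s.2.modify p.2.1 [] (· ++ [p.1]))) (cd, idd)
    = (l.foldl (fun d p => d.modify p.2.1 [] (· ++ [p.2.2])) cd,
       l.foldl (fun d p => d.modify p.2.1 [] (· ++ [p.1])) idd) := by
  induction l generalizing cd idd with
  | nil => rfl
  | cons p l ih =>
    simp only [List.foldl_cons]
    by_cases h : cd.contains p.2.1 = true
    · rw [if_pos h]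
      exact ih _ _ (fun k => by simp [PySem.Dict.contains_modify, hk k])
    · rw [if_neg h]
      simp only [Bool.not_eq_true] at h
      rw [insert_nil_modify _ _ _ h, insert_nil_modify _ _ _ ((hk _) ▸ h)]
      exact ih _ _ (fun k => by simp [PySem.Dict.contains_modify, hk k])

-- swap the zip: graphs-with-labels filtered on the label, projected to the graph
lemma zip_swap_filter (gs ls : List Int) (lab : Int) :
    ((gs.zip ls).filter (fun p => p.2 == lab)).map (·.1)
      = ((ls.zip gs).filter (fun p => p.1 == lab)).map (·.2) := by
  induction gs generalizing ls with
  | nil => cases ls <;> rfl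
  | cons g gs ih =>
    cases ls with
    | nil => rfl
    | cons l ls =>
      by_cases h : l = lab <;> simp [h, ih]

-- indices of the enumerated zip, filtered on the label, match enumerate of the labels
lemma enumerate_zip_filter (ls : List Int) (gs : List Int) (s : Int) (lab : Int)
    (hlen : ls.length = gs.length) :
    (((PySem.List.enumerate (ls.zip gs) s).map (fun p => (p.2.1, p.1))).filter
        (fun q => q.1 == lab)).map (·.2)
      = ((PySem.List.enumerate ls s).filter (fun q => q.2 == lab)).map (·.1) := by
  induction ls generalizing gs s with
  | nil => cases gs <;> simp [PySem.List.enumerate_nil]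
  | cons l ls ih =>
    cases gs with
    | nil => simp at hlen
    | cons g gs =>
      simp only [List.zip_cons_cons, PySem.List.enumerate_cons]
      by_cases h : l = lab <;>
        simp [h, ih gs (s + 1) (by simpa using hlen)]

-- items of the A-side class-dict fold, in closed form
lemma itemsA_class (graphs class_labels : List Int)
    (hpre : graphs.length = class_labels.length) :
    (((PySem.List.enumerate (class_labels.zip graphs) 0).foldl
        (fun d p => d.modify p.2.1 [] (· ++ [p.2.2])) PySem.Dict.empty)).items
      = (PySem.List.dedup class_labels).map
          (fun lab => (lab, ((graphs.zip class_labels).filter (fun p => p.2 == lab)).map (·.1))) := by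
  have e1 : ((PySem.List.enumerate (class_labels.zip graphs) 0).foldl
        (fun d p => d.modify p.2.1 [] (· ++ [p.2.2])) PySem.Dict.empty)
      = (((PySem.List.enumerate (class_labels.zip graphs) 0).map (·.2)).foldl
        (fun d q => d.modify q.1 [] (· ++ [q.2])) PySem.Dict.empty) := by rw [List.foldl_map]
  rw [e1, PySem.List.map_snd_enumerate]
  have hnd : ((class_labels.zip graphs).foldl
      (fun d q => d.modify q.1 [] (· ++ [q.2])) PySem.Dict.empty).keys.Nodup :=
    PySem.Dict.nodup_keys_foldl_modify_key _ Prod.fst [] (fun _ q => (· ++ [q.2])) _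
      (by simp [PySem.Dict.keys_empty])
  rw [PySem.Dict.items_eq_map_keys _ hnd []]
  rw [PySem.Dict.keys_foldl_modify_key _ Prod.fst [] (fun _ q => (· ++ [q.2])) _]
  have hfst : (class_labels.zip graphs).map Prod.fst = class_labels :=
    List.map_fst_zip (le_of_eq hpre.symm)
  rw [PySem.Dict.keys_empty, PySem.Set.update_nil_left, hfst, PySem.List.dedup_eq_ofList]
  refine List.map_congr_left (fun lab _ => ?_)
  rw [PySem.Dict.getD_foldl_modify_append, PySem.Dict.getD_empty, List.nil_append,
    zip_swap_filter]

-- items of the A-side index-dict fold, in closed form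
lemma itemsA_index (graphs class_labels : List Int)
    (hpre : graphs.length = class_labels.length) :
    (((PySem.List.enumerate (class_labels.zip graphs) 0).foldl
        (fun d p => d.modify p.2.1 [] (· ++ [p.1])) PySem.Dict.empty)).items
      = (PySem.List.dedup class_labels).map
          (fun lab => (lab, ((PySem.List.enumerate class_labels 0).filter (fun p => p.2 == lab)).map (·.1))) := by
  have e1 : ((PySem.List.enumerate (class_labels.zip graphs) 0).foldl
        (fun d p => d.modify p.2.1 [] (· ++ [p.1])) PySem.Dict.empty)
      = (((PySem.List.enumerate (class_labels.zip graphs) 0).map (fun p => (p.2.1, p.1))).foldl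
        (fun d q => d.modify q.1 [] (· ++ [q.2])) PySem.Dict.empty) := by rw [List.foldl_map]
  rw [e1]
  have hnd : (((PySem.List.enumerate (class_labels.zip graphs) 0).map (fun p => (p.2.1, p.1))).foldl
      (fun d q => d.modify q.1 [] (· ++ [q.2])) PySem.Dict.empty).keys.Nodup :=
    PySem.Dict.nodup_keys_foldl_modify_key _ Prod.fst [] (fun _ q => (· ++ [q.2])) _
      (by simp [PySem.Dict.keys_empty])
  rw [PySem.Dict.items_eq_map_keys _ hnd []]
  rw [PySem.Dict.keys_foldl_modify_key _ Prod.fst [] (fun _ q => (· ++ [q.2])) _]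
  have hkeys : ((PySem.List.enumerate (class_labels.zip graphs) 0).map (fun p => (p.2.1, p.1))).map Prod.fst
      = class_labels := by
    have h2 : ((PySem.List.enumerate (class_labels.zip graphs) 0).map (fun p => (p.2.1, p.1))).map Prod.fst
        = ((PySem.List.enumerate (class_labels.zip graphs) 0).map (·.2)).map Prod.fst := by
      rw [List.map_map, List.map_map]; rfl
    rw [h2, PySem.List.map_snd_enumerate]
    exact List.map_fst_zip (le_of_eq hpre.symm)
  rw [PySem.Dict.keys_empty, PySem.Set.update_nil_left, hkeys, PySem.List.dedup_eq_ofList]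
  refine List.map_congr_left (fun lab _ => ?_)
  rw [PySem.Dict.getD_foldl_modify_append, PySem.Dict.getD_empty, List.nil_append,
    enumerate_zip_filter _ _ _ _ hpre.symm]

-- ===== VERDICT (by name: the statement is the Claim_ definition above) =====
theorem split_graphs_by_class_and_indices_spec : Claim_equal_split_graphs_by_class_and_indices := by
  intro graphs class_labels _ hpre
  unfold Pre_split_graphs_by_class_and_indices at hpre
  unfold Spec_split_graphs_by_class_and_indices
  show (let pairs := PySem.List.enumerate (class_labels.zip graphs) 0
        let s := pairs.foldl (fun s p =>
            let s := if s.1.contains p.2.1 then s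
                     else (s.1.insert p.2.1 ([] : List Int), s.2.insert p.2.1 ([] : List Int))
            (s.1.modify p.2.1 [] (· ++ [p.2.2]), s.2.modify p.2.1 [] (· ++ [p.1])))
          ((PySem.Dict.empty : PySem.Dict Int (List Int)), (PySem.Dict.empty : PySem.Dict Int (List Int)))
        (s.1.items, s.2.items)) = _
  simp only []
  rw [foldl_pair_split _ _ _ (fun k => rfl)]
  unfold split_graphs_by_class_and_indices_alt
  rw [itemsA_class _ _ hpre, itemsA_index _ _ hpre]
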